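-- pv_equiv track=rewrite | github.com/Samet-Hodaman/Advent-of-Code-2023- | Advent of Code/Day12- Hot Springs/day12.py | isSuitable2
-- ===== SOURCE A (Python) =====
-- def isSuitable2(spring : str, damaged : list) -> bool:
--     parts = []
--
--     before = False
--     part = 0
--
--     for char in spring:
--         if char == "#":
--             part += 1
--             if not before:
--                 before = True
--         elif char == ".":
--             if before:
--                 parts.append(part)
--                 before = False
--                 part = 0
--     if before:
--         parts.append(part)
--         part = 0
--         before = False
--
--     if not len(parts) == len(damaged):
--         return False
--
--     for i in range(0,len(parts)):
--         if not parts[i] ==  (int)(damaged[i]):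
--             return False
--
--     return True
-- ===== SOURCE B (Python) =====
-- def isSuitable2(spring : str, damaged : list) -> bool:
--     parts = [seg.count('#') for seg in spring.split('.') if '#' in seg]
--     return parts == [int(d) for d in damaged]
-- ===== Notes on version B (the rewrite author's own statement) =====
-- stated objective: idiomatic
-- what changed: Replaces the stateful char-by-char scan (before/part flags plus a separate length check and index loop) with a single split-on-'.' pass that counts '#' in each segment containing one and compares the resulting list to damaged by one list equality.
import Mathlib
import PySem

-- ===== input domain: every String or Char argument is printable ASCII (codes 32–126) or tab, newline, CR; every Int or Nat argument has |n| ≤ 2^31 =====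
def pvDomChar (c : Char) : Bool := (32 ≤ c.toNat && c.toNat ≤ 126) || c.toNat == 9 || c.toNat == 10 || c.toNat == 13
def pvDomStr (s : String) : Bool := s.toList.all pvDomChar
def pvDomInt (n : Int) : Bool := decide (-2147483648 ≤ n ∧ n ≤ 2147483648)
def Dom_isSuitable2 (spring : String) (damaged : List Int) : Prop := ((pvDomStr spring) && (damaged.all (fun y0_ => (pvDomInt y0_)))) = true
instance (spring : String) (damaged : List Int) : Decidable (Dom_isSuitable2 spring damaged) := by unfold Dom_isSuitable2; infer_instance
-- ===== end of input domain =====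

-- B replaces A's stateful char-by-char scan with an idiomatic split-on-'.' pass and one list equality.


-- ===== PORT A =====
-- A's loop body: state (parts, before, part)
def stepA (s : List Int × Bool × Int) (char : Char) : List Int × Bool × Int :=
  if char == '#' then
    (s.1, true, s.2.2 + 1)
  else if char == '.' then
    (if s.2.1 then (s.1 ++ [s.2.2], false, 0) else s)
  else s

def isSuitable2 (spring : String) (damaged : List Int) : Bool :=
  let st := spring.toList.foldl stepA ([], false, 0)
  let parts := if st.2.1 then st.1 ++ [st.2.2] else st.1
  if !(PySem.List.len parts == PySem.List.len damaged) then false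
  else
    (PySem.List.pyRange 0 (PySem.List.len parts) 1).all
      (fun i => PySem.List.pyGetD parts i 0 == PySem.List.pyGetD damaged i 0)

-- ===== PORT B =====
def isSuitable2_alt (spring : String) (damaged : List Int) : Bool :=
  let parts :=
    ((PySem.Chars.splitOn spring.toList ['.']).filter
        (fun seg => PySem.Chars.isIn ['#'] seg)).map
      (fun seg => ((PySem.Chars.count seg ['#'] : Nat) : Int))
  parts == damaged.map (fun d => d)

-- ===== PRECONDITION & SPEC =====
def Spec_isSuitable2 (spring : String) (damaged : List Int) (out : Bool) : Prop := out = isSuitable2_alt spring damaged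
instance (spring : String) (damaged : List Int) (out : Bool) : Decidable (Spec_isSuitable2 spring damaged out) := by unfold Spec_isSuitable2; infer_instance

-- ===== CLAIM (what is proved, stated in full; the proofs are below) =====
def Claim_equal_isSuitable2 : Prop := ∀ (spring : String) (damaged : List Int), Dom_isSuitable2 spring damaged → Spec_isSuitable2 spring damaged (isSuitable2 spring damaged)

-- ===== LEMMAS AND PROOFS =====

-- the '.'-separated pieces of a char list (spec for split('.'))
def pieces : List Char → List (List Char)
  | [] => [[]]
  | c :: cs =>
    if c = '.' then [] :: pieces cs
    else
      match pieces cs with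
      | [] => [[c]]
      | p :: ps => (c :: p) :: ps

theorem pieces_ne_nil (cs : List Char) : pieces cs ≠ [] := by
  cases cs with
  | nil => simp [pieces]
  | cons c cs =>
    simp only [pieces]
    split
    · simp
    · split <;> simp

theorem splitOn_go_dot (cs : List Char) : ∀ (fuel : Nat), cs.length ≤ fuel →
    ∀ (cur : List Char) (acc : List (List Char)),
    PySem.Chars.splitOn.go ['.'] fuel cs cur acc
      = acc.reverse ++ (match pieces cs with
          | [] => []
          | p :: ps => (cur.reverse ++ p) :: ps) := by
  induction cs with
  | nil =>
    intro fuel _ cur acc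
    cases fuel <;> simp [PySem.Chars.splitOn.go, pieces]
  | cons c cs ih =>
    intro fuel hf cur acc
    cases fuel with
    | zero => simp at hf
    | succ f =>
      by_cases hc : c = '.'
      · subst hc
        rw [show PySem.Chars.splitOn.go ['.'] (f+1) ('.' :: cs) cur acc
            = PySem.Chars.splitOn.go ['.'] f cs [] (cur.reverse :: acc) by
          simp [PySem.Chars.splitOn.go, List.isPrefixOf]]
        rw [ih f (by simpa using hf) [] (cur.reverse :: acc)]
        rcases h : pieces cs with _ | ⟨p, ps⟩
        · exact absurd h (pieces_ne_nil cs)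
        · simp [pieces, h]
      · rw [show PySem.Chars.splitOn.go ['.'] (f+1) (c :: cs) cur acc
            = PySem.Chars.splitOn.go ['.'] f cs (c :: cur) acc by
          simp [PySem.Chars.splitOn.go, List.isPrefixOf, Ne.symm hc]]
        rw [ih f (by simpa using hf) (c :: cur) acc]
        rcases h : pieces cs with _ | ⟨p, ps⟩
        · exact absurd h (pieces_ne_nil cs)
        · simp [pieces, h, hc]

theorem splitOn_dot (cs : List Char) : PySem.Chars.splitOn cs ['.'] = pieces cs := by
  rw [PySem.Chars.splitOn, splitOn_go_dot cs (cs.length + 1) (by omega) [] []]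
  rcases h : pieces cs with _ | ⟨p, ps⟩
  · exact absurd h (pieces_ne_nil cs)
  · simp

theorem count_go_hash (cs : List Char) : ∀ (fuel : Nat), cs.length ≤ fuel → ∀ (acc : Nat),
    PySem.Chars.count.go ['#'] fuel cs acc = acc + cs.count '#' := by
  induction cs with
  | nil => intro fuel _ acc; cases fuel <;> simp [PySem.Chars.count.go]
  | cons c cs ih =>
    intro fuel hf acc
    cases fuel with
    | zero => simp at hf
    | succ f =>
      by_cases hc : c = '#'
      · subst hc
        rw [show PySem.Chars.count.go ['#'] (f+1) ('#' :: cs) acc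
            = PySem.Chars.count.go ['#'] f cs (acc + 1) by
          simp [PySem.Chars.count.go, List.isPrefixOf]]
        rw [ih f (by simpa using hf) (acc + 1)]
        simp; omega
      · rw [show PySem.Chars.count.go ['#'] (f+1) (c :: cs) acc
            = PySem.Chars.count.go ['#'] f cs acc by
          simp [PySem.Chars.count.go, List.isPrefixOf, Ne.symm hc]]
        rw [ih f (by simpa using hf) acc]
        simp [hc]

theorem count_hash (cs : List Char) : PySem.Chars.count cs ['#'] = cs.count '#' := by
  rw [PySem.Chars.count]
  simp [count_go_hash cs cs.length le_rfl 0]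

theorem isIn_hash (cs : List Char) : PySem.Chars.isIn ['#'] cs = cs.contains '#' := by
  rw [Bool.eq_iff_iff, PySem.Chars.isIn_iff_infix, List.singleton_infix_iff]
  simp

-- B's value of a piece list, with `part` '#'s carried into the first piece
def bfin (part : Int) : List (List Char) → List Int
  | [] => []
  | p :: ps => (if 0 < part + (p.count '#' : Int) then [part + (p.count '#' : Int)] else []) ++ bfin 0 ps

theorem bfin_zero (ps : List (List Char)) :
    bfin 0 ps = (ps.filter (fun seg => PySem.Chars.isIn ['#'] seg)).map
      (fun seg => ((PySem.Chars.count seg ['#'] : Nat) : Int)) := by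
  induction ps with
  | nil => rfl
  | cons p ps ih =>
    simp only [bfin, ih, List.filter_cons, isIn_hash, count_hash]
    by_cases h : '#' ∈ p
    · have hcnt : 0 < p.count '#' := List.count_pos_iff.mpr h
      have hpos : (0:Int) < 0 + (p.count '#' : Int) := by omega
      simp [h]
    · have h0 : p.count '#' = 0 := List.count_eq_zero.mpr h
      simp [h, h0]

theorem loopA (cs : List Char) : ∀ (parts : List Int) (part : Int), 0 ≤ part →
    (let st := cs.foldl stepA (parts, decide (0 < part), part);
     if st.2.1 then st.1 ++ [st.2.2] else st.1) = parts ++ bfin part (pieces cs) := by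
  induction cs with
  | nil =>
    intro parts part hp
    by_cases h : 0 < part <;> simp [bfin, pieces, h]
  | cons c cs ih =>
    intro parts part hp
    by_cases hh : c = '#'
    · subst hh
      have h1 : stepA (parts, decide (0 < part), part) '#' = (parts, decide (0 < part + 1), part + 1) := by
        simp [stepA]; omega
      simp only [List.foldl_cons, h1]
      rw [ih parts (part + 1) (by omega)]
      rcases h : pieces cs with _ | ⟨p, ps⟩
      · exact absurd h (pieces_ne_nil cs)
      · have hc : ('#' :: p).count '#' = p.count '#' + 1 := by simp
        have harith : part + 1 + (p.count '#' : Int) = part + ((p.count '#' : Nat) + 1 : Nat) := by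
          push_cast; ring
        simp only [pieces, h, if_neg (by decide : ¬('#' = '.')), bfin, hc]
        rw [harith]
    · by_cases hd : c = '.'
      · subst hd
        by_cases h0 : 0 < part
        · have h1 : stepA (parts, decide (0 < part), part) '.' = (parts ++ [part], decide ((0:Int) < 0), 0) := by
            simp [stepA, h0]
          simp only [List.foldl_cons, h1]
          rw [ih (parts ++ [part]) 0 le_rfl]
          simp [pieces, bfin, h0]
        · have hp0 : part = 0 := by omega
          subst hp0
          have h1 : stepA (parts, decide ((0:Int) < 0), 0) '.' = (parts, decide ((0:Int) < 0), 0) := by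
            simp [stepA]
          simp only [List.foldl_cons, h1]
          rw [ih parts 0 le_rfl]
          simp [pieces, bfin]
      · have h1 : stepA (parts, decide (0 < part), part) c = (parts, decide (0 < part), part) := by
          simp [stepA, hh, hd]
        simp only [List.foldl_cons, h1]
        rw [ih parts part hp]
        rcases h : pieces cs with _ | ⟨p, ps⟩
        · exact absurd h (pieces_ne_nil cs)
        · simp [pieces, h, hd, bfin, hh]

theorem allEq (xs ys : List Int) (h : xs.length = ys.length) :
    ((List.range ys.length).all fun k => PySem.List.pyGetD xs (k : Int) 0 == PySem.List.pyGetD ys (k : Int) 0)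
      = (xs == ys) := by
  rw [Bool.eq_iff_iff]
  simp only [List.all_eq_true, List.mem_range, PySem.List.pyGetD_natCast, beq_iff_eq]
  constructor
  · intro hall
    apply List.ext_getElem h
    intro k hk1 hk2
    have := hall k hk2
    simpa [List.getD_eq_getElem, hk1, hk2] using this
  · rintro rfl k _; rfl

theorem eqCheck (xs ys : List Int) :
    (if !(PySem.List.len xs == PySem.List.len ys) then false
     else (PySem.List.pyRange 0 (PySem.List.len xs) 1).all
        (fun i => PySem.List.pyGetD xs i 0 == PySem.List.pyGetD ys i 0)) = (xs == ys) := by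
  by_cases h : xs.length = ys.length
  · simp only [PySem.List.len_eq, h, beq_self_eq_true, Bool.not_true, Bool.false_eq_true,
      if_false, PySem.List.pyRange_zero_natCast, List.all_map]
    exact allEq xs ys h
  · have hyx : (xs == ys) = false := by
      simp only [beq_eq_false_iff_ne, ne_eq]
      intro hxy; exact h (by rw [hxy])
    have hne : (((xs.length : Int)) == ((ys.length : Int))) = false := by
      simp [h]
    simp [PySem.List.len_eq, hne, hyx]

-- ===== VERDICT (by name: the statement is the Claim_ definition above) =====
theorem isSuitable2_spec : Claim_equal_isSuitable2 := by
  intro spring damaged _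
  unfold Spec_isSuitable2
  have hA := loopA spring.toList [] 0 le_rfl
  simp only [show (decide ((0:Int) < 0)) = false by decide] at hA
  simp only [isSuitable2, isSuitable2_alt]
  rw [hA]
  simp only [List.nil_append, splitOn_dot, ← bfin_zero]
  rw [eqCheck]
  simp
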